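-- pv_equiv track=rewrite | github.com/vanity03/Workshop | functions/get_lexical.py | sequences
-- ===== SOURCE A (Python) =====
-- def sequences(domain):
--     vowels = "aeiouy"
--     consonants = "bcdfghjklmnpqrstvwxz"
--     nums = "0123456789"
--     special_chars = "-"
--
--     max_vowel_sequence = 0
--     max_consonant_sequence = 0
--     max_num_sequence = 0
--     max_special_sequence = 0
--     vowel_count = 0
--     consonant_count = 0
--     num_count = 0
--     special_count = 0
--
--     for char in domain:
--         char = char.lower()
--
--         if char in vowels:
--             vowel_count += 1
--             consonant_count = num_count = special_count = 0
--
--         elif char in consonants: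
--             consonant_count += 1
--             vowel_count = num_count = special_count = 0
--
--         elif char in nums:
--             num_count += 1
--             vowel_count = consonant_count = special_count = 0
--
--         elif char in special_chars:
--             special_count += 1
--             vowel_count = consonant_count = num_count = 0
--
--         else:
--             vowel_count = consonant_count = num_count = special_count = 0
--
--
--         max_vowel_sequence = max(max_vowel_sequence, vowel_count)
--         max_consonant_sequence = max(max_consonant_sequence, consonant_count)
--         max_num_sequence = max(max_num_sequence, num_count)
--         max_special_sequence = max(max_special_sequence, special_count)
--
--     return max_vowel_sequence, max_consonant_sequence, max_num_sequence, max_special_sequence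
-- ===== SOURCE B (Python) =====
-- def sequences(domain):
--     def classify(ch):
--         ch = ch.lower()
--         if ch in "aeiouy":
--             return "v"
--         if ch in "bcdfghjklmnpqrstvwxz":
--             return "c"
--         if ch in "0123456789":
--             return "n"
--         if ch == "-":
--             return "s"
--         return "o"
--
--     labels = [classify(ch) for ch in domain]
--     best = {}
--     n = len(labels)
--     i = 0
--     while i < n:
--         lab = labels[i]
--         j = i + 1
--         while j < n and labels[j] == lab:
--             j += 1
--         if lab != "o":
--             best[lab] = max(best.get(lab, 0), j - i)
--         i = j
--     return best.get("v", 0), best.get("c", 0), best.get("n", 0), best.get("s", 0)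
-- ===== Notes on version B (the rewrite author's own statement) =====
-- stated objective: alternative
-- what changed: Replaces the single pass that increments/resets four coupled counters per character by a classify-to-labels pass followed by a scan over maximal runs (inner while over equal labels) that updates a dict of per-class maximum run lengths.
import Mathlib
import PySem

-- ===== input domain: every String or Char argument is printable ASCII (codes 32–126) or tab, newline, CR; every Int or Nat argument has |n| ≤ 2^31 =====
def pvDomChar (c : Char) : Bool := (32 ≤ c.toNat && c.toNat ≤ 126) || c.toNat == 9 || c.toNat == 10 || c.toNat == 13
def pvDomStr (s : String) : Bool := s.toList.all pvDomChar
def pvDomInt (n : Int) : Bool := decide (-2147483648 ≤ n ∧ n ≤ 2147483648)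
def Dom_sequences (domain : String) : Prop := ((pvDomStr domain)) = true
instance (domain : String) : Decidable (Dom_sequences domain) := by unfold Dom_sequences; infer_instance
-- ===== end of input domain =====

-- B re-implements the four coupled per-character counters as a classify-then-group-runs pass
-- (labels, maximal runs, a dict of per-class maxima); same values, different decomposition ("alternative").

-- ===== PORT A =====
-- A's loop body (the 8 variables as one tuple: mv, mc, mn, ms, cv, cc, cn, cs).
-- 'char in vowels' for a 1-character char is character membership, ported as list membership.
def seqStep (st : Int × Int × Int × Int × Int × Int × Int × Int) (ch : Char) :
    Int × Int × Int × Int × Int × Int × Int × Int :=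
  let (mv, mc, mn, ms, cv, cc, cn, cs) := st
  let c := PySem.Chars.lowerChar ch
  let (cv, cc, cn, cs) :=
    if c ∈ "aeiouy".toList then (cv + 1, (0 : Int), (0 : Int), (0 : Int))
    else if c ∈ "bcdfghjklmnpqrstvwxz".toList then ((0 : Int), cc + 1, (0 : Int), (0 : Int))
    else if c ∈ "0123456789".toList then ((0 : Int), (0 : Int), cn + 1, (0 : Int))
    else if c ∈ "-".toList then ((0 : Int), (0 : Int), (0 : Int), cs + 1)
    else ((0 : Int), (0 : Int), (0 : Int), (0 : Int))
  (max mv cv, max mc cc, max mn cn, max ms cs, cv, cc, cn, cs)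

def sequences (domain : String) : Int × Int × Int × Int :=
  let st := domain.toList.foldl seqStep (0, 0, 0, 0, 0, 0, 0, 0)
  (st.1, st.2.1, st.2.2.1, st.2.2.2.1)

-- ===== PORT B =====
-- Source B's classify(ch): labels 'v'/'c'/'n'/'s'/'o' (1-character strings, ported as Char).
def classifyAlt (ch : Char) : Char :=
  let c := PySem.Chars.lowerChar ch
  if c ∈ "aeiouy".toList then 'v'
  else if c ∈ "bcdfghjklmnpqrstvwxz".toList then 'c'
  else if c ∈ "0123456789".toList then 'n'
  else if c = '-' then 's'
  else 'o'

-- Source B's while loop over maximal runs: the inner 'while labels[j] == lab' scan is the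
-- takeWhile/dropWhile split of the rest of the label list; j - i is the run length.
def runsAlt : List Char → PySem.Dict Char Int → PySem.Dict Char Int
  | [], best => best
  | lab :: rest, best =>
    let run := rest.takeWhile (fun y => y = lab)
    let rest' := rest.dropWhile (fun y => y = lab)
    let best' := if lab ≠ 'o'
      then best.insert lab (max (best.getD lab 0) ((run.length : Int) + 1))
      else best
    runsAlt rest' best'
termination_by ls _ => ls.length
decreasing_by
  simp only [List.length_cons]
  exact Nat.lt_succ_of_le (List.length_dropWhile_le _ _)

def sequences_alt (domain : String) : Int × Int × Int × Int :=
  let labels := domain.toList.map classifyAlt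
  let best := runsAlt labels PySem.Dict.empty
  (best.getD 'v' 0, best.getD 'c' 0, best.getD 'n' 0, best.getD 's' 0)

-- ===== PRECONDITION & SPEC =====
def Spec_sequences (domain : String) (out : Int × Int × Int × Int) : Prop := out = sequences_alt domain
instance (domain : String) (out : Int × Int × Int × Int) : Decidable (Spec_sequences domain out) := by unfold Spec_sequences; infer_instance

-- ===== CLAIM (what is proved, stated in full; the proofs are below) =====
def Claim_equal_sequences : Prop := ∀ (domain : String), Dom_sequences domain → Spec_sequences domain (sequences domain)

-- ===== LEMMAS AND PROOFS =====

-- Reference: the per-class scan step, reading the label of a char ('v','c','n','s').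
def stepL (l : Char) (p : Int × Int) (x : Char) : Int × Int :=
  let cur := if x = l then p.1 + 1 else 0
  (cur, max p.2 cur)

-- Reference: maximum run length of label l in a label list, by the same run decomposition as runsAlt.
def mrun (l : Char) : List Char → Int
  | [] => 0
  | x :: rest =>
    let run := rest.takeWhile (fun y => y = x)
    let rest' := rest.dropWhile (fun y => y = x)
    max (if x = l then (run.length : Int) + 1 else 0) (mrun l rest')
termination_by ls => ls.length
decreasing_by
  simp only [List.length_cons]
  exact Nat.lt_succ_of_le (List.length_dropWhile_le _ _)

theorem mrun_nonneg (l : Char) (ls : List Char) : 0 ≤ mrun l ls := by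
  induction ls using mrun.induct with
  | case1 => simp [mrun]
  | case2 x rest ih =>
    rw [mrun]
    omega

-- A uniform run of l's: each step increments cur and the maxima collapse.
theorem foldl_stepL_all_eq (l : Char) (run : List Char) (cur best : Int)
    (hall : ∀ y ∈ run, y = l) (hle : cur ≤ best) :
    run.foldl (stepL l) (cur, best) = (cur + run.length, max best (cur + run.length)) := by
  induction run generalizing cur best with
  | nil => simp only [List.foldl_nil, List.length_nil, Prod.mk.injEq]; push_cast; omega
  | cons y ys ih =>
    have hy : y = l := hall y (by simp)
    rw [List.foldl_cons]
    have : stepL l (cur, best) y = (cur + 1, max best (cur + 1)) := by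
      simp [stepL, hy]
    rw [this, ih (cur + 1) (max best (cur + 1))
      (fun z hz => hall z (List.mem_cons_of_mem _ hz)) (by omega)]
    simp only [List.length_cons, Prod.mk.injEq]
    push_cast
    omega

-- A uniform run of non-l's from cur = 0: the state is unchanged.
theorem foldl_stepL_none_eq (l : Char) (run : List Char) (best : Int)
    (hall : ∀ y ∈ run, y ≠ l) (hb : 0 ≤ best) :
    run.foldl (stepL l) (0, best) = (0, best) := by
  induction run with
  | nil => rfl
  | cons y ys ih =>
    have hy : y ≠ l := hall y (by simp)
    rw [List.foldl_cons]
    have : stepL l ((0 : Int), best) y = (0, best) := by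
      simp [stepL, hy]; omega
    rw [this, ih (fun z hz => hall z (List.mem_cons_of_mem _ hz))]

-- The single-pass scan for label l equals the run-based maximum.
set_option maxHeartbeats 800000 in
theorem foldl_stepL_eq_mrun (l : Char) (ls : List Char) (cur best : Int)
    (h0 : 0 ≤ cur) (hle : cur ≤ best) (hstart : cur = 0 ∨ ls.head? ≠ some l) :
    (ls.foldl (stepL l) (cur, best)).2 = max best (mrun l ls) := by
  induction ls using mrun.induct generalizing cur best with
  | case1 => simp [mrun]; omega
  | case2 x rest rest' ih =>
    rw [show rest' = rest.dropWhile (fun y => decide (y = x)) from rfl] at ih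
    have hsplit : rest = rest.takeWhile (fun y => decide (y = x)) ++
        rest.dropWhile (fun y => decide (y = x)) := (List.takeWhile_append_dropWhile ..).symm
    have hhead : (rest.dropWhile (fun y => decide (y = x))).head? ≠ some x := by
      intro h
      have h2 := List.head?_dropWhile_not (fun y => decide (y = x)) rest
      rw [h] at h2
      simp at h2
    rw [mrun]
    by_cases hx : x = l
    · subst hx
      have hcur : cur = 0 := by
        rcases hstart with h | h
        · exact h
        · exact absurd (by simp : (x :: rest).head? = some x) h
      subst hcur
      have hstep : stepL x ((0 : Int), best) x = (1, max best 1) := by simp [stepL]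
      rw [List.foldl_cons, hstep]
      conv_lhs => rw [hsplit]
      rw [List.foldl_append,
        foldl_stepL_all_eq x _ 1 (max best 1)
          (fun y hy => by simpa using List.mem_takeWhile_imp hy) (by omega),
        ih (1 + (rest.takeWhile (fun y => decide (y = x))).length)
          (max (max best 1) (1 + (rest.takeWhile (fun y => decide (y = x))).length))
          (by omega) (by omega) (Or.inr (fun h => hhead h))]
      have := mrun_nonneg x (rest.dropWhile (fun y => decide (y = x)))
      simp only [if_pos]
      omega
    · have hstep : stepL l (cur, best) x = (0, best) := by
        simp [stepL, hx, max_eq_left (le_trans h0 hle)]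
      rw [List.foldl_cons, hstep]
      conv_lhs => rw [hsplit]
      rw [List.foldl_append,
        foldl_stepL_none_eq l _ best
          (fun y hy => by
            have hyx := List.mem_takeWhile_imp hy
            simp at hyx
            subst hyx
            exact hx)
          (by omega),
        ih 0 best le_rfl (by omega) (Or.inl rfl)]
      have := mrun_nonneg l (rest.dropWhile (fun y => decide (y = x)))
      rw [if_neg hx]
      omega

theorem seqStep_eq (mv mc mn ms cv cc cn cs8 : Int) (ch : Char) :
    seqStep (mv, mc, mn, ms, cv, cc, cn, cs8) ch =
      (max mv (if classifyAlt ch = 'v' then cv + 1 else 0),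
       max mc (if classifyAlt ch = 'c' then cc + 1 else 0),
       max mn (if classifyAlt ch = 'n' then cn + 1 else 0),
       max ms (if classifyAlt ch = 's' then cs8 + 1 else 0),
       (if classifyAlt ch = 'v' then cv + 1 else 0),
       (if classifyAlt ch = 'c' then cc + 1 else 0),
       (if classifyAlt ch = 'n' then cn + 1 else 0),
       (if classifyAlt ch = 's' then cs8 + 1 else 0)) := by
  simp only [seqStep, classifyAlt]
  split_ifs <;> simp_all

-- A's 8-variable fold is the product of the four independent per-class scans.
theorem foldl_seqStep_proj (cs : List Char) (mv mc mn ms cv cc cn cs8 : Int) :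
    cs.foldl seqStep (mv, mc, mn, ms, cv, cc, cn, cs8) =
      (let pv := cs.foldl (fun p ch => stepL 'v' p (classifyAlt ch)) (cv, mv)
       let pc := cs.foldl (fun p ch => stepL 'c' p (classifyAlt ch)) (cc, mc)
       let pn := cs.foldl (fun p ch => stepL 'n' p (classifyAlt ch)) (cn, mn)
       let ps := cs.foldl (fun p ch => stepL 's' p (classifyAlt ch)) (cs8, ms)
       (pv.2, pc.2, pn.2, ps.2, pv.1, pc.1, pn.1, ps.1)) := by
  induction cs generalizing mv mc mn ms cv cc cn cs8 with
  | nil => rfl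
  | cons ch rest ih =>
    simp only [List.foldl_cons, seqStep_eq, stepL]
    exact ih _ _ _ _ _ _ _ _

-- B's run loop computes, for each class key, the max of the incoming entry and the run maximum.
set_option maxHeartbeats 800000 in
theorem runsAlt_getD (ls : List Char) (d : PySem.Dict Char Int) (l : Char)
    (hl : l ≠ 'o') :
    0 ≤ d.getD l 0 → (runsAlt ls d).getD l 0 = max (d.getD l 0) (mrun l ls) := by
  induction ls, d using runsAlt.induct with
  | case1 d => intro hd; simp [runsAlt, mrun]; omega
  | case2 lab rest d run rest' best' ih =>
    intro hd
    rw [show rest' = rest.dropWhile (fun y => decide (y = lab)) from rfl,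
      show best' = (if lab ≠ 'o'
        then d.insert lab (max (d.getD lab 0)
          (((rest.takeWhile (fun y => decide (y = lab))).length : Int) + 1))
        else d) from rfl] at ih
    rw [runsAlt, mrun]
    by_cases ho : lab = 'o'
    · rw [if_neg (by simp [ho])] at ih ⊢
      rw [ih hd, if_neg (by rw [ho]; exact fun h => hl h.symm)]
      have := mrun_nonneg l (rest.dropWhile (fun y => decide (y = lab)))
      omega
    · rw [if_pos ho] at ih ⊢
      by_cases hll : lab = l
      · subst hll
        rw [ih (by rw [PySem.Dict.getD_insert_self]; omega),
          PySem.Dict.getD_insert_self, if_pos rfl]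
        have := mrun_nonneg lab (rest.dropWhile (fun y => decide (y = lab)))
        omega
      · have hne : l ≠ lab := fun h => hll h.symm
        rw [ih (by rw [PySem.Dict.getD_insert, if_neg hne]; omega),
          PySem.Dict.getD_insert]
        rw [if_neg hne, if_neg hll]
        have := mrun_nonneg l (rest.dropWhile (fun y => decide (y = lab)))
        omega

theorem sequences_eq_mrun (domain : String) (l : Char) :
    (domain.toList.foldl (fun p ch => stepL l p (classifyAlt ch)) ((0 : Int), (0 : Int))).2 =
      mrun l (domain.toList.map classifyAlt) := by
  rw [show domain.toList.foldl (fun p ch => stepL l p (classifyAlt ch)) ((0 : Int), (0 : Int))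
      = (domain.toList.map classifyAlt).foldl (stepL l) ((0 : Int), (0 : Int)) from
    (List.foldl_map ..).symm]
  rw [foldl_stepL_eq_mrun l _ 0 0 le_rfl le_rfl (Or.inl rfl)]
  have := mrun_nonneg l (domain.toList.map classifyAlt)
  omega

theorem sequences_alt_eq_mrun (domain : String) (l : Char) (hl : l ≠ 'o') :
    (runsAlt (domain.toList.map classifyAlt) PySem.Dict.empty).getD l 0 =
      mrun l (domain.toList.map classifyAlt) := by
  have he : (PySem.Dict.empty : PySem.Dict Char Int).getD l 0 = 0 := by
    simp [PySem.Dict.getD, PySem.Dict.get?, PySem.Dict.empty]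
  rw [runsAlt_getD _ _ _ hl (by rw [he]), he]
  have := mrun_nonneg l (domain.toList.map classifyAlt)
  omega

-- ===== VERDICT (by name: the statement is the Claim_ definition above) =====
theorem sequences_spec : Claim_equal_sequences := by
  intro domain _
  unfold Spec_sequences sequences sequences_alt
  rw [foldl_seqStep_proj]
  simp only
  rw [sequences_eq_mrun domain 'v', sequences_eq_mrun domain 'c',
    sequences_eq_mrun domain 'n', sequences_eq_mrun domain 's',
    sequences_alt_eq_mrun domain 'v' (by decide), sequences_alt_eq_mrun domain 'c' (by decide),
    sequences_alt_eq_mrun domain 'n' (by decide), sequences_alt_eq_mrun domain 's' (by decide)]
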